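-- pv_equiv track=rewrite | github.com/JELAshford/symba-alice-2026 | DNA_part/simulation.py | _has_internal_holes
-- ===== SOURCE A (Python) =====
-- COMP = {"A": "T", "T": "A", "C": "G", "G": "C"}
--
-- def _is_paired(t, b):
--     return t is not None and b is not None and COMP[t] == b
--
-- def _has_internal_holes(cols):
--     paired_idx = [
--         i for i, (t, b, _) in enumerate(cols)
--         if _is_paired(t, b)
--     ]
--     if len(paired_idx) < 2:
--         return False
--     L, R = paired_idx[0], paired_idx[-1]
--     for i in range(L, R + 1):
--         t, b, _ = cols[i]
--         if not _is_paired(t, b):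
--             return True
--     return False
-- ===== SOURCE B (Python) =====
-- COMP = {"A": "T", "T": "A", "C": "G", "G": "C"}
--
-- def _is_paired(t, b):
--     return t is not None and b is not None and COMP[t] == b
--
-- def _has_internal_holes(cols):
--     paired_idx = [
--         i for i, (t, b, _) in enumerate(cols)
--         if _is_paired(t, b)
--     ]
--     # holes exist iff the paired indices do not fill the whole span [first, last]
--     return len(paired_idx) >= 2 and len(paired_idx) < paired_idx[-1] - paired_idx[0] + 1
-- ===== Notes on version B (the rewrite author's own statement) =====
-- stated objective: simpler
-- what changed: B keeps A's single pass that collects the paired column indices but replaces A's second scan over cols[L..R] with an O(1) arithmetic test: holes exist iff len(paired_idx) < paired_idx[-1] - paired_idx[0] + 1 (count vs span).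
import Mathlib
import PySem

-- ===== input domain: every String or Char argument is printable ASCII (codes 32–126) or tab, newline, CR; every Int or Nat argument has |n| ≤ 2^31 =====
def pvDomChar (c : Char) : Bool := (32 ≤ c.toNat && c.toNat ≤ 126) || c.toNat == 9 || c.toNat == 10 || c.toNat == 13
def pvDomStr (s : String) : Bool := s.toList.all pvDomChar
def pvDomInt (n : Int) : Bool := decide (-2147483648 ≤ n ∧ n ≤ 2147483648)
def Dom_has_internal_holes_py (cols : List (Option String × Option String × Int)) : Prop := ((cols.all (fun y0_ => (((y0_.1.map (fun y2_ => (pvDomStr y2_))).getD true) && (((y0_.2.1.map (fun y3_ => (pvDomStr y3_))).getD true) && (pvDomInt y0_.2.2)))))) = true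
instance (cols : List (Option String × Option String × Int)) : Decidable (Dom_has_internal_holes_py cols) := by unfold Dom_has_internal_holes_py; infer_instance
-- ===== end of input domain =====

-- B replaces A's second scan over cols[L..R] by the O(1) count-vs-span test
-- len(paired_idx) < R - L + 1 (objective: simpler).

-- ===== PORT A =====
-- COMP = {"A": "T", "T": "A", "C": "G", "G": "C"}
def pvComp : PySem.Dict String String :=
  PySem.Dict.ofList [("A", "T"), ("T", "A"), ("C", "G"), ("G", "C")]

-- _is_paired(t, b); Python raises KeyError when t is a key missing from COMP
-- (and b is not None) — those inputs are excluded by Pre_ below.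
def pvIsPaired (t b : Option String) : Bool :=
  match t, b with
  | some ts, some bs => pvComp.get? ts == some bs
  | _, _ => false

def has_internal_holes_py (cols : List (Option String × Option String × Int)) : Bool :=
  let paired_idx : List Int :=
    (PySem.List.enumerate cols 0).foldl
      (fun acc p => if pvIsPaired p.2.1 p.2.2.1 then acc ++ [p.1] else acc) []
  if paired_idx.length < 2 then false
  else
    let L := PySem.List.pyGetD paired_idx 0 0
    let R := PySem.List.pyGetD paired_idx (-1) 0
    -- for i in range(L, R+1): if not _is_paired(...): return True
    -- (cols[i] is always in range here, so the default of pyGetD is never used)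
    (PySem.List.pyRange L (R + 1) 1).any (fun i =>
      let c := PySem.List.pyGetD cols i (none, none, 0)
      !(pvIsPaired c.1 c.2.1))

-- ===== PORT B =====
def has_internal_holes_py_alt (cols : List (Option String × Option String × Int)) : Bool :=
  let paired_idx : List Int :=
    (PySem.List.enumerate cols 0).foldl
      (fun acc p => if pvIsPaired p.2.1 p.2.2.1 then acc ++ [p.1] else acc) []
  -- len(paired_idx) >= 2 and len(paired_idx) < paired_idx[-1] - paired_idx[0] + 1
  -- (the indexing is guarded by len >= 2 in Python; pyGetD's default is never used)
  decide (2 ≤ paired_idx.length) &&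
    decide ((paired_idx.length : Int) <
      PySem.List.pyGetD paired_idx (-1) 0 - PySem.List.pyGetD paired_idx 0 0 + 1)

-- ===== PRECONDITION & SPEC =====
-- Pre_ excludes exactly the inputs where Python raises KeyError: a column whose
-- top and bottom are both non-None but whose top is not a key of COMP.
def Pre_has_internal_holes_py (cols : List (Option String × Option String × Int)) : Prop :=
  ∀ c ∈ cols, c.1.isSome → (c.2.1 : Option String).isSome →
    c.1.getD "" ∈ (["A", "T", "C", "G"] : List String)
instance (cols : List (Option String × Option String × Int)) : Decidable (Pre_has_internal_holes_py cols) := by unfold Pre_has_internal_holes_py; infer_instance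

def pvWitness_has_internal_holes_py : (List (Option String × Option String × Int)) :=
  [(some "A", some "T", 0), (none, some "G", 1), (some "C", some "G", 2)]

def Spec_has_internal_holes_py (cols : List (Option String × Option String × Int)) (out : Bool) : Prop := out = has_internal_holes_py_alt cols
instance (cols : List (Option String × Option String × Int)) (out : Bool) : Decidable (Spec_has_internal_holes_py cols out) := by unfold Spec_has_internal_holes_py; infer_instance

-- ===== CLAIM (what is proved, stated in full; the proofs are below) =====
def Claim_equal_has_internal_holes_py : Prop := ∀ (cols : List (Option String × Option String × Int)), Dom_has_internal_holes_py cols → Pre_has_internal_holes_py cols → Spec_has_internal_holes_py cols (has_internal_holes_py cols)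

-- ===== LEMMAS AND PROOFS =====

-- the list of paired column indices, in increasing order
def pvIdx (cols : List (Option String × Option String × Int)) : List Int :=
  ((PySem.List.enumerate cols 0).filter (fun p => pvIsPaired p.2.1 p.2.2.1)).map (·.1)

-- the per-index paired test used by A's second loop
def pvQ (cols : List (Option String × Option String × Int)) (i : Int) : Bool :=
  pvIsPaired (PySem.List.pyGetD cols i (none, none, 0)).1
             (PySem.List.pyGetD cols i (none, none, 0)).2.1

theorem pv_foldl_eq_idx (cols : List (Option String × Option String × Int)) :
    (PySem.List.enumerate cols 0).foldl
      (fun acc p => if pvIsPaired p.2.1 p.2.2.1 then acc ++ [p.1] else acc) []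
    = pvIdx cols := by
  simpa [pvIdx] using
    PySem.List.foldl_append_if (fun p : Int × (Option String × Option String × Int) =>
      pvIsPaired p.2.1 p.2.2.1) (·.1) (PySem.List.enumerate cols 0) []

theorem pv_idx_pairwise (cols : List (Option String × Option String × Int)) :
    (pvIdx cols).Pairwise (· < ·) := by
  unfold pvIdx
  exact (List.Pairwise.filter _ (PySem.List.pairwise_lt_enumerate cols 0)).map _
    (fun a b h => h)

theorem pv_mem_idx (cols : List (Option String × Option String × Int)) (i : Int) :
    i ∈ pvIdx cols ↔ 0 ≤ i ∧ i < cols.length ∧ pvQ cols i = true := by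
  unfold pvIdx
  simp only [List.mem_map, List.mem_filter, PySem.List.mem_enumerate_iff]
  constructor
  · rintro ⟨p, ⟨⟨k, hk, rfl⟩, hpair⟩, rfl⟩
    dsimp only
    simp only [zero_add]
    refine ⟨Int.natCast_nonneg k, by exact_mod_cast hk, ?_⟩
    simp only [pvQ, PySem.List.pyGetD_natCast, List.getD_eq_getElem?_getD,
      List.getElem?_eq_getElem hk, Option.getD_some]
    simpa using hpair
  · rintro ⟨h0, hn, hq⟩
    have hk : i.toNat < cols.length := by omega
    have hi : i = ((i.toNat : ℕ) : ℤ) := by omega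
    rw [hi] at hq
    simp only [pvQ, PySem.List.pyGetD_natCast, List.getD_eq_getElem?_getD,
      List.getElem?_eq_getElem hk, Option.getD_some] at hq
    exact ⟨((i.toNat : ℤ), cols[i.toNat]), ⟨⟨i.toNat, hk, by simp⟩, by simpa using hq⟩,
      by dsimp only; omega⟩

theorem pv_head_le {l : List Int} (hp : l.Pairwise (· < ·)) (hne : l ≠ [])
    {x : Int} (hx : x ∈ l) : l.head hne ≤ x := by
  cases l with
  | nil => simp at hne
  | cons a t =>
    rcases List.mem_cons.mp hx with rfl | hxt
    · simp
    · exact le_of_lt ((List.pairwise_cons.mp hp).1 x hxt)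

theorem pv_le_getLast {l : List Int} (hp : l.Pairwise (· < ·)) (hne : l ≠ [])
    {x : Int} (hx : x ∈ l) : x ≤ l.getLast hne := by
  induction l with
  | nil => simp at hne
  | cons a t ih =>
    cases t with
    | nil => simp at hx; simp [hx]
    | cons b u =>
      have hp' := List.pairwise_cons.mp hp
      rw [List.getLast_cons (by simp)]
      rcases List.mem_cons.mp hx with rfl | hxt
      · exact le_of_lt (lt_of_lt_of_le (hp'.1 _ (List.getLast_mem (by simp)))
          (le_refl _))
      · exact ih hp'.2 (by simp) hxt

theorem pv_any_not (l : List Int) (p : Int → Bool) :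
    l.any (fun i => !p i) = decide ((l.filter p).length < l.length) := by
  by_cases h : ∃ x ∈ l, ¬ p x = true
  · rw [decide_eq_true (List.length_filter_lt_length_iff_exists.mpr h)]
    simp only [List.any_eq_true, Bool.not_eq_true']
    obtain ⟨x, hx, hpx⟩ := h
    exact ⟨x, hx, by simpa using hpx⟩
  · rw [decide_eq_false (by rw [List.length_filter_lt_length_iff_exists]; exact h)]
    simp only [List.any_eq_false, Bool.not_eq_true']
    intro x hx
    by_contra hc
    exact h ⟨x, hx, by simpa using hc⟩

-- ===== VERDICT (by name: the statement is the Claim_ definition above) =====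
theorem has_internal_holes_py_spec : Claim_equal_has_internal_holes_py := by
  intro cols _ _
  unfold Spec_has_internal_holes_py has_internal_holes_py has_internal_holes_py_alt
  rw [pv_foldl_eq_idx]
  have hpw := pv_idx_pairwise cols
  have hmem := pv_mem_idx cols
  generalize hg : pvIdx cols = idx at hpw hmem ⊢
  by_cases hk : idx.length < 2
  · simp only [if_pos hk]
    have h2 : ¬ (2 ≤ idx.length) := by omega
    simp [h2]
  · simp only [if_neg hk]
    have hk2 : 2 ≤ idx.length := by omega
    have hne : idx ≠ [] := by intro h; rw [h] at hk2; simp at hk2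
    have hL : PySem.List.pyGetD idx 0 0 = idx.head hne := by
      cases idx with
      | nil => simp at hne
      | cons a t => simp [PySem.List.pyGetD_zero]
    have hR : PySem.List.pyGetD idx (-1) 0 = idx.getLast hne :=
      PySem.List.pyGetD_neg_one idx 0 hne
    rw [hL, hR]
    have hLmem : idx.head hne ∈ idx := List.head_mem hne
    have hRmem : idx.getLast hne ∈ idx := List.getLast_mem hne
    have hLR : idx.head hne ≤ idx.getLast hne := pv_head_le hpw hne hRmem
    have hL0 : 0 ≤ idx.head hne := ((hmem _).mp hLmem).1
    have hRn : idx.getLast hne < cols.length := ((hmem _).mp hRmem).2.1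
    -- idx is exactly the paired indices inside [L, R]
    have heq : (PySem.List.pyRange (idx.head hne) (idx.getLast hne + 1) 1).filter
        (pvQ cols) = idx := by
      refine List.Perm.eq_of_pairwise (le := (· < ·))
        (fun a b _ _ h1 h2 => by omega)
        (List.Pairwise.filter _ (PySem.List.pairwise_lt_pyRange_one _ _)) hpw
        ((List.perm_ext_iff_of_nodup
          ((PySem.List.nodup_pyRange_one _ _).filter _) (hpw.imp ne_of_lt)).mpr ?_)
      intro x
      simp only [List.mem_filter, PySem.List.mem_pyRange_one, hmem]
      constructor
      · rintro ⟨⟨h1, h2⟩, hq⟩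
        exact ⟨by omega, by omega, hq⟩
      · rintro ⟨h0, hn, hq⟩
        have hx : x ∈ idx := (hmem x).mpr ⟨h0, hn, hq⟩
        refine ⟨⟨pv_head_le hpw hne hx, ?_⟩, hq⟩
        have := pv_le_getLast hpw hne hx; omega
    -- the second scan of A tests whether the span contains an unpaired column
    have hany : (PySem.List.pyRange (idx.head hne) (idx.getLast hne + 1) 1).any (fun i =>
        let c := PySem.List.pyGetD cols i (none, none, 0)
        !(pvIsPaired c.1 c.2.1))
        = decide (idx.length < (idx.getLast hne + 1 - idx.head hne).toNat) := by
      have h := pv_any_not (PySem.List.pyRange (idx.head hne) (idx.getLast hne + 1) 1)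
        (pvQ cols)
      simp only [pvQ] at h
      rw [h, heq, PySem.List.length_pyRange_one]
    rw [hany]
    have h2 : decide (2 ≤ idx.length) = true := by simp [hk2]
    rw [h2, Bool.true_and, decide_eq_decide]
    omega
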